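-- pv_equiv track=rewrite | github.com/teja41749-cyber/t | backend/app/services/nlp_processor.py | _infer_attribute_type
-- ===== SOURCE A (Python) =====
-- def _infer_attribute_type(attr_name: str) -> str:
--     """Infer attribute type from name."""
--     attr_name_lower = attr_name.lower()
--
--     # Common type patterns
--     if any(keyword in attr_name_lower for keyword in ['id', 'code', 'number']):
--         return 'Integer'
--     elif any(keyword in attr_name_lower for keyword in ['price', 'amount', 'balance', 'rate']):
--         return 'Float'
--     elif any(keyword in attr_name_lower for keyword in ['date', 'time', 'created', 'updated']):
--         return 'DateTime'
--     elif any(keyword in attr_name_lower for keyword in ['is', 'has', 'can', 'active', 'enabled']):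
--         return 'Boolean'
--     elif any(keyword in attr_name_lower for keyword in ['email', 'name', 'description', 'title']):
--         return 'String'
--     else:
--         return 'String'  # Default type
-- ===== SOURCE B (Python) =====
-- # Text-driven multi-pattern scan: walk the lowered name once position by position,
-- # keep the minimum priority among keywords starting at each position (naive
-- # multi-pattern matcher with a priority accumulator). No if/elif cascade, no
-- # per-group early return; the 'String' keyword group is gone entirely because
-- # its type equals the default.
-- _KEYWORD_PRIORITY = [
--     ('id', 0), ('code', 0), ('number', 0),
--     ('price', 1), ('amount', 1), ('balance', 1), ('rate', 1),
--     ('date', 2), ('time', 2), ('created', 2), ('updated', 2),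
--     ('is', 3), ('has', 3), ('can', 3), ('active', 3), ('enabled', 3),
-- ]
-- _TYPES = ['Integer', 'Float', 'DateTime', 'Boolean', 'String']
--
-- def _infer_attribute_type(attr_name: str) -> str:
--     lowered = attr_name.lower()
--     best = 4  # default: 'String'
--     for i in range(len(lowered)):
--         for kw, pr in _KEYWORD_PRIORITY:
--             if pr < best and lowered.startswith(kw, i):
--                 best = pr
--     return _TYPES[best]
-- ===== Notes on version B (the rewrite author's own statement) =====
-- stated objective: alternative
-- what changed: Replaces the five-branch substring-test cascade with a text-driven multi-pattern scan: one walk over the positions of the lowercased name keeping the minimum priority among keywords that start at each position, then indexing a type table; the keyword group whose type coincides with the default is dropped entirely (trades a larger constant factor for the different traversal).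
import Mathlib
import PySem

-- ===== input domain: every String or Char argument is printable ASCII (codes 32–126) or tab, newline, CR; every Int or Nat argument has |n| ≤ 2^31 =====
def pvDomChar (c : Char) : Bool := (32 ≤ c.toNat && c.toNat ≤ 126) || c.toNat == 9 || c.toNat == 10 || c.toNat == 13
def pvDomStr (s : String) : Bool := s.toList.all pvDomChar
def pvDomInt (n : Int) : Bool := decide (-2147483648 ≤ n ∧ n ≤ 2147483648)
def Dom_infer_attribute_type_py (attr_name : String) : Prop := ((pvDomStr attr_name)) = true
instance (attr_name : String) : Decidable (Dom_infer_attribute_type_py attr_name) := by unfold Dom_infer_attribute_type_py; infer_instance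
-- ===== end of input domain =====

-- B replaces A's five-branch substring cascade with a text-driven multi-pattern scan keeping a minimum-priority accumulator (objective: alternative).


-- ===== PORT A =====
def infer_attribute_type_py (attr_name : String) : String :=
  let attr_name_lower := PySem.Str.lower attr_name
  if (["id", "code", "number"].any (fun keyword => PySem.Str.isIn keyword attr_name_lower)) then "Integer"
  else if (["price", "amount", "balance", "rate"].any (fun keyword => PySem.Str.isIn keyword attr_name_lower)) then "Float"
  else if (["date", "time", "created", "updated"].any (fun keyword => PySem.Str.isIn keyword attr_name_lower)) then "DateTime"
  else if (["is", "has", "can", "active", "enabled"].any (fun keyword => PySem.Str.isIn keyword attr_name_lower)) then "Boolean"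
  else if (["email", "name", "description", "title"].any (fun keyword => PySem.Str.isIn keyword attr_name_lower)) then "String"
  else "String"

-- ===== PORT B =====
def pvKeywordPriority : List (String × Nat) :=
  [ ("id", 0), ("code", 0), ("number", 0)
  , ("price", 1), ("amount", 1), ("balance", 1), ("rate", 1)
  , ("date", 2), ("time", 2), ("created", 2), ("updated", 2)
  , ("is", 3), ("has", 3), ("can", 3), ("active", 3), ("enabled", 3) ]

def pvTypes : List String := ["Integer", "Float", "DateTime", "Boolean", "String"]

-- Python's 'lowered.startswith(kw, i)' with 0 ≤ i is exactly 'kw is a prefix of lowered[i:]',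
-- i.e. PySem.Chars.startswith (chars.drop i.toNat) kw (i ranges over range(len), so 0 ≤ i).
def infer_attribute_type_py_alt (attr_name : String) : String :=
  let lowered := PySem.Str.lower attr_name
  let best : Nat := (PySem.List.pyRange 0 (PySem.Str.len lowered) 1).foldl (fun best i =>
      pvKeywordPriority.foldl (fun best kp =>
        if kp.2 < best && PySem.Chars.startswith (lowered.toList.drop i.toNat) kp.1.toList
        then kp.2 else best) best) 4
  PySem.List.pyGetD pvTypes (best : Int) ""   -- _TYPES[best]; best ≤ 4 always, so in range

-- ===== PRECONDITION & SPEC =====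
def Spec_infer_attribute_type_py (attr_name : String) (out : String) : Prop := out = infer_attribute_type_py_alt attr_name
instance (attr_name : String) (out : String) : Decidable (Spec_infer_attribute_type_py attr_name out) := by unfold Spec_infer_attribute_type_py; infer_instance

-- ===== CLAIM (what is proved, stated in full; the proofs are below) =====
def Claim_equal_infer_attribute_type_py : Prop := ∀ (attr_name : String), Dom_infer_attribute_type_py attr_name → Spec_infer_attribute_type_py attr_name (infer_attribute_type_py attr_name)

-- ===== LEMMAS AND PROOFS =====

-- the inner keyword fold: result ≤ k iff the accumulator already is, or some matching keyword has priority ≤ k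
theorem pv_inner_le (L : List Char) (i : Nat) (kws : List (String × Nat)) (b k : Nat) :
    (kws.foldl (fun best kp =>
        if kp.2 < best && PySem.Chars.startswith (L.drop i) kp.1.toList
        then kp.2 else best) b) ≤ k
    ↔ b ≤ k ∨ ∃ kp ∈ kws, kp.2 ≤ k ∧ PySem.Chars.startswith (L.drop i) kp.1.toList = true := by
  induction kws generalizing b with
  | nil => simp
  | cons h t ih =>
    simp only [List.foldl_cons, List.mem_cons]
    cases hc : (h.2 < b && PySem.Chars.startswith (L.drop i) h.1.toList) with
    | false =>
      simp only [ih]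
      simp only [Bool.and_eq_false_iff] at hc
      constructor
      · rintro (hb | ⟨kp, hm, hk, hs⟩)
        · exact Or.inl hb
        · exact Or.inr ⟨kp, Or.inr hm, hk, hs⟩
      · rintro (hb | ⟨kp, hm, hk, hs⟩)
        · exact Or.inl hb
        · rcases hm with rfl | hm
          · rcases hc with hlt | hsw
            · simp only [decide_eq_false_iff_not, not_lt] at hlt; exact Or.inl (le_trans hlt hk)
            · rw [hs] at hsw; cases hsw
          · exact Or.inr ⟨kp, hm, hk, hs⟩
    | true =>
      simp only [if_true, ih]
      simp only [Bool.and_eq_true, decide_eq_true_eq] at hc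
      constructor
      · rintro (hb | ⟨kp, hm, hk, hs⟩)
        · exact Or.inr ⟨h, Or.inl rfl, hb, hc.2⟩
        · exact Or.inr ⟨kp, Or.inr hm, hk, hs⟩
      · rintro (hb | ⟨kp, hm, hk, hs⟩)
        · exact Or.inl (le_of_lt (lt_of_lt_of_le hc.1 hb))
        · rcases hm with rfl | hm
          · exact Or.inl hk
          · exact Or.inr ⟨kp, hm, hk, hs⟩

-- the outer position fold over range n
theorem pv_outer_le (L : List Char) (kws : List (String × Nat)) (n b k : Nat) :
    ((List.range n).foldl (fun best i =>
        kws.foldl (fun best kp =>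
          if kp.2 < best && PySem.Chars.startswith (L.drop i) kp.1.toList
          then kp.2 else best) best) b) ≤ k
    ↔ b ≤ k ∨ ∃ kp ∈ kws, kp.2 ≤ k ∧ ∃ i < n, PySem.Chars.startswith (L.drop i) kp.1.toList = true := by
  induction n generalizing b with
  | zero => simp
  | succ m ih =>
    rw [List.range_succ, List.foldl_append]
    simp only [List.foldl_cons, List.foldl_nil]
    rw [pv_inner_le, ih]
    constructor
    · rintro ((hb | ⟨kp, hm, hk, i, hi, hs⟩) | ⟨kp, hm, hk, hs⟩)
      · exact Or.inl hb
      · exact Or.inr ⟨kp, hm, hk, i, Nat.lt_succ_of_lt hi, hs⟩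
      · exact Or.inr ⟨kp, hm, hk, m, Nat.lt_succ_self m, hs⟩
    · rintro (hb | ⟨kp, hm, hk, i, hi, hs⟩)
      · exact Or.inl (Or.inl hb)
      · rcases Nat.lt_succ_iff_lt_or_eq.mp hi with hi' | rfl
        · exact Or.inl (Or.inr ⟨kp, hm, hk, i, hi', hs⟩)
        · exact Or.inr ⟨kp, hm, hk, hs⟩

-- a keyword matches at some position of L iff it is a Python substring of L (nonempty keyword)
theorem pv_pos_iff_isIn (kw L : List Char) (h : kw ≠ []) :
    (∃ i < L.length, PySem.Chars.startswith (L.drop i) kw = true) ↔ PySem.Chars.isIn kw L = true := by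
  rw [← PySem.Chars.exists_prefix_drop_iff_isIn]
  constructor
  · rintro ⟨i, _, hs⟩
    exact ⟨i, (PySem.Chars.startswith_iff _ _).mp hs⟩
  · rintro ⟨j, hp⟩
    by_cases hj : j < L.length
    · exact ⟨j, hj, (PySem.Chars.startswith_iff _ _).mpr hp⟩
    · exfalso
      rw [List.drop_eq_nil_of_le (Nat.le_of_not_lt hj)] at hp
      exact h (List.prefix_nil.mp hp)

-- proof-only name for B's scan (same term as the port's fold after range normalisation)
def pvScan (L : List Char) : Nat :=
  (List.range L.length).foldl (fun best i =>
    pvKeywordPriority.foldl (fun best kp =>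
      if kp.2 < best && PySem.Chars.startswith (L.drop i) kp.1.toList
      then kp.2 else best) best) 4

theorem pv_scan_le (L : List Char) (k : Nat) :
    pvScan L ≤ k ↔ 4 ≤ k ∨ ∃ kp ∈ pvKeywordPriority, kp.2 ≤ k ∧ PySem.Chars.isIn kp.1.toList L = true := by
  have hnonnil : ∀ kp ∈ pvKeywordPriority, kp.1.toList ≠ [] := by decide
  unfold pvScan
  rw [pv_outer_le]
  refine or_congr Iff.rfl ⟨?_, ?_⟩
  · rintro ⟨kp, hm, hk, hp⟩
    exact ⟨kp, hm, hk, (pv_pos_iff_isIn _ _ (hnonnil kp hm)).mp hp⟩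
  · rintro ⟨kp, hm, hk, hp⟩
    exact ⟨kp, hm, hk, (pv_pos_iff_isIn _ _ (hnonnil kp hm)).mpr hp⟩

set_option maxHeartbeats 1000000 in
theorem pv_assemble (L : List Char) :
    (if (["id", "code", "number"].any fun kw => PySem.Chars.isIn kw.toList L) = true then "Integer"
     else if (["price", "amount", "balance", "rate"].any fun kw => PySem.Chars.isIn kw.toList L) = true then "Float"
     else if (["date", "time", "created", "updated"].any fun kw => PySem.Chars.isIn kw.toList L) = true then "DateTime"
     else if (["is", "has", "can", "active", "enabled"].any fun kw => PySem.Chars.isIn kw.toList L) = true then "Boolean"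
     else if (["email", "name", "description", "title"].any fun kw => PySem.Chars.isIn kw.toList L) = true then "String"
     else "String")
    = PySem.List.pyGetD pvTypes ((pvScan L : Nat) : Int) "" := by
  have h4 : pvScan L ≤ 4 := (pv_scan_le L 4).mpr (Or.inl le_rfl)
  by_cases c0 : (["id", "code", "number"].any fun kw => PySem.Chars.isIn kw.toList L) = true
  · have hv : pvScan L = 0 := by
      have : pvScan L ≤ 0 := by
        rcases List.any_eq_true.mp c0 with ⟨kw, hkw, hin⟩
        fin_cases hkw <;>
          first
          | exact (pv_scan_le L 0).mpr (Or.inr ⟨("id", 0), by decide, le_refl 0, hin⟩)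
          | exact (pv_scan_le L 0).mpr (Or.inr ⟨("code", 0), by decide, le_refl 0, hin⟩)
          | exact (pv_scan_le L 0).mpr (Or.inr ⟨("number", 0), by decide, le_refl 0, hin⟩)
      omega
    rw [if_pos c0, hv]; rfl
  · have n0 : ¬ pvScan L ≤ 0 := by
      intro h
      rcases (pv_scan_le L 0).mp h with h' | ⟨kp, hm, hk, hin⟩
      · omega
      · fin_cases hm <;>
          first
          | (refine absurd hk ?_; decide)
          | (refine absurd ?_ c0; simp at hin; simp [hin]; done)
    rw [if_neg c0]
    by_cases c1 : (["price", "amount", "balance", "rate"].any fun kw => PySem.Chars.isIn kw.toList L) = true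
    · have hv : pvScan L = 1 := by
        have : pvScan L ≤ 1 := by
          rcases List.any_eq_true.mp c1 with ⟨kw, hkw, hin⟩
          fin_cases hkw <;>
            first
            | exact (pv_scan_le L 1).mpr (Or.inr ⟨("price", 1), by decide, le_refl 1, hin⟩)
            | exact (pv_scan_le L 1).mpr (Or.inr ⟨("amount", 1), by decide, le_refl 1, hin⟩)
            | exact (pv_scan_le L 1).mpr (Or.inr ⟨("balance", 1), by decide, le_refl 1, hin⟩)
            | exact (pv_scan_le L 1).mpr (Or.inr ⟨("rate", 1), by decide, le_refl 1, hin⟩)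
        omega
      rw [if_pos c1, hv]; rfl
    · have n1 : ¬ pvScan L ≤ 1 := by
        intro h
        rcases (pv_scan_le L 1).mp h with h' | ⟨kp, hm, hk, hin⟩
        · omega
        · fin_cases hm <;>
            first
            | (refine absurd hk ?_; decide)
            | (refine absurd ?_ c0; simp at hin; simp [hin]; done)
            | (refine absurd ?_ c1; simp at hin; simp [hin]; done)
      rw [if_neg c1]
      by_cases c2 : (["date", "time", "created", "updated"].any fun kw => PySem.Chars.isIn kw.toList L) = true
      · have hv : pvScan L = 2 := by
          have : pvScan L ≤ 2 := by
            rcases List.any_eq_true.mp c2 with ⟨kw, hkw, hin⟩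
            fin_cases hkw <;>
              first
              | exact (pv_scan_le L 2).mpr (Or.inr ⟨("date", 2), by decide, le_refl 2, hin⟩)
              | exact (pv_scan_le L 2).mpr (Or.inr ⟨("time", 2), by decide, le_refl 2, hin⟩)
              | exact (pv_scan_le L 2).mpr (Or.inr ⟨("created", 2), by decide, le_refl 2, hin⟩)
              | exact (pv_scan_le L 2).mpr (Or.inr ⟨("updated", 2), by decide, le_refl 2, hin⟩)
          omega
        rw [if_pos c2, hv]; rfl
      · have n2 : ¬ pvScan L ≤ 2 := by
          intro h
          rcases (pv_scan_le L 2).mp h with h' | ⟨kp, hm, hk, hin⟩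
          · omega
          · fin_cases hm <;>
              first
              | (refine absurd hk ?_; decide)
              | (refine absurd ?_ c0; simp at hin; simp [hin]; done)
              | (refine absurd ?_ c1; simp at hin; simp [hin]; done)
              | (refine absurd ?_ c2; simp at hin; simp [hin]; done)
        rw [if_neg c2]
        by_cases c3 : (["is", "has", "can", "active", "enabled"].any fun kw => PySem.Chars.isIn kw.toList L) = true
        · have hv : pvScan L = 3 := by
            have : pvScan L ≤ 3 := by
              rcases List.any_eq_true.mp c3 with ⟨kw, hkw, hin⟩
              fin_cases hkw <;>
                first
                | exact (pv_scan_le L 3).mpr (Or.inr ⟨("is", 3), by decide, le_refl 3, hin⟩)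
                | exact (pv_scan_le L 3).mpr (Or.inr ⟨("has", 3), by decide, le_refl 3, hin⟩)
                | exact (pv_scan_le L 3).mpr (Or.inr ⟨("can", 3), by decide, le_refl 3, hin⟩)
                | exact (pv_scan_le L 3).mpr (Or.inr ⟨("active", 3), by decide, le_refl 3, hin⟩)
                | exact (pv_scan_le L 3).mpr (Or.inr ⟨("enabled", 3), by decide, le_refl 3, hin⟩)
            omega
          rw [if_pos c3, hv]; rfl
        · have n3 : ¬ pvScan L ≤ 3 := by
            intro h
            rcases (pv_scan_le L 3).mp h with h' | ⟨kp, hm, hk, hin⟩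
            · omega
            · fin_cases hm <;>
                first
                | (refine absurd hk ?_; decide)
                | (refine absurd ?_ c0; simp at hin; simp [hin]; done)
                | (refine absurd ?_ c1; simp at hin; simp [hin]; done)
                | (refine absurd ?_ c2; simp at hin; simp [hin]; done)
                | (refine absurd ?_ c3; simp at hin; simp [hin]; done)
          rw [if_neg c3]
          have hv : pvScan L = 4 := by omega
          rw [hv, ite_self]; rfl

-- ===== VERDICT (by name: the statement is the Claim_ definition above) =====
theorem infer_attribute_type_py_spec : Claim_equal_infer_attribute_type_py := by
  intro s _
  unfold Spec_infer_attribute_type_py infer_attribute_type_py infer_attribute_type_py_alt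
  simp only [PySem.Str.isIn_eq, PySem.Str.len_eq, PySem.List.pyRange_zero_nat, List.foldl_map,
    Int.toNat_natCast]
  exact pv_assemble (PySem.Str.lower s).toList
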